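-- pv_equiv track=rewrite | github.com/lizhongyuan/ODE_simulation_and_Lizhongyuan_diagram | main.py | gen_binomial_theorem_collection
-- ===== SOURCE A (Python) =====
-- from typing import List
--
-- def gen_binomial_theorem_collection(p_elements: str,
--                                     p_contain_zero: bool,
--                                     p_zero_elem: str,
--                                     p_err_elem: str) -> List[List[str]]:
--     """
--     生成二项式定理型数据
--     @param p_elements: 元素集合
--     @param p_contain_zero: 是否包含0元素
--     @param p_zero_elem: 0元素字符
--     @param p_err_elem: 错误PDIE字符
--     @return: 组合数据
--     """
--
--     comb_and_next_start_collection: List[List[dict]] = []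
--     binomial_theorem_collection: List[List[str]] = []
--
--     if p_contain_zero:
--         binomial_theorem_collection: List[List[str]] = [[p_zero_elem]]
--
--     binomial_theorem_collection.append([p_err_elem])
--
--     for i in range(len(p_elements)):
--         cur_comb_and_next_start_list: List[dict] = []
--         if i == 0:
--             for j in range(len(p_elements)):
--                 cur_comb_and_next_start: dict = {
--                     'combination': p_elements[j],
--                     'next_trip_starting_idx': j + 1
--                 }
--                 cur_comb_and_next_start_list.append(cur_comb_and_next_start)
--         else:
--             pre_comb_and_next_start_list: List[dict] = comb_and_next_start_collection[i - 1]
--             for pre_comb_and_next_start in pre_comb_and_next_start_list: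
--                 pre_comb: str = pre_comb_and_next_start['combination']
--                 for j in range(pre_comb_and_next_start['next_trip_starting_idx'], len(p_elements)):
--                     cur_comb: str = pre_comb + p_elements[j]
--                     cur_comb_and_next_start: dict = {
--                         'combination': cur_comb,
--                         'next_trip_starting_idx': j + 1
--                     }
--                     cur_comb_and_next_start_list.append(cur_comb_and_next_start)
--         comb_and_next_start_collection.append(cur_comb_and_next_start_list)
--
--     for i in range(len(p_elements)):
--         cur_binomial_theorem_item: List[str] = []
--         for j in range(len(comb_and_next_start_collection[i])):
--             cur_comb: str = comb_and_next_start_collection[i][j]['combination']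
--             cur_binomial_theorem_item.append(cur_comb)
--         binomial_theorem_collection.append(cur_binomial_theorem_item)
--
--     return binomial_theorem_collection
-- ===== SOURCE B (Python) =====
-- from itertools import combinations
-- from typing import List
--
--
-- def gen_binomial_theorem_collection(p_elements: str,
--                                     p_contain_zero: bool,
--                                     p_zero_elem: str,
--                                     p_err_elem: str) -> List[List[str]]:
--     result: List[List[str]] = [[p_zero_elem]] if p_contain_zero else []
--     result.append([p_err_elem])
--     for k in range(1, len(p_elements) + 1):
--         result.append([''.join(c) for c in combinations(p_elements, k)])
--     return result
-- ===== Notes on version B (the rewrite author's own statement) =====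
-- stated objective: idiomatic
-- what changed: Replaces A's level-by-level construction of dicts carrying 'next_trip_starting_idx' (each level built by extending the previous level's records, then a second pass extracting the strings) with a direct per-size generation via itertools.combinations, joining each combination into a string.
import Mathlib
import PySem

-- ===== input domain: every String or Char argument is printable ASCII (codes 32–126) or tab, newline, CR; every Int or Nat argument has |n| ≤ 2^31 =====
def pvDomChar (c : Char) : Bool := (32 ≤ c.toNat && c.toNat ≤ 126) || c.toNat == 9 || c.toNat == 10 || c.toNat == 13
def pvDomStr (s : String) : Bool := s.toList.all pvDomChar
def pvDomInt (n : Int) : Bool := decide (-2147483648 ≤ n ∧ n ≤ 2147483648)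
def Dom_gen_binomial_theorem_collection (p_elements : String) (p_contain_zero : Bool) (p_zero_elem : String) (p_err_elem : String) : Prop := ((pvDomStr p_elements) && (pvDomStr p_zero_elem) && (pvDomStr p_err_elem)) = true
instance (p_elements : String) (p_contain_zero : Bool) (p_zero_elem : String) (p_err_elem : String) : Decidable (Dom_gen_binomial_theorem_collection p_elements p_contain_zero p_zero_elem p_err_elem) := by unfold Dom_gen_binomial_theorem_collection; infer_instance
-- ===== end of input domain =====

-- B replaces A's level-by-level dict construction (records carrying 'next_trip_starting_idx',
-- plus a second extraction pass) by direct per-size generation of the combinations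
-- (itertools.combinations order); objective: idiomatic. Both programs are pure.

-- ===== PORT A =====
-- A's record {'combination', 'next_trip_starting_idx'} is the pair (String × Nat).
-- p_elements[j] is only read at indices 0 ≤ j < len(p_elements), so it is ported as
-- toList.getD j ' ' (the default is never reached) — exact on every admitted input.

-- the i == 0 branch of A's first loop
def pvLevel0 (chars : List Char) : List (String × Nat) :=
  (List.range chars.length).foldl
    (fun acc j => acc ++ [(String.singleton (chars.getD j ' '), j + 1)]) []

-- the i != 0 branch of A's first loop (range(start, len) ported as List.range' start (len - start))
def pvLevelStep (chars : List Char) (prev : List (String × Nat)) : List (String × Nat) :=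
  prev.foldl
    (fun acc pc =>
      (List.range' pc.2 (chars.length - pc.2)).foldl
        (fun acc2 j => acc2 ++ [(pc.1 ++ String.singleton (chars.getD j ' '), j + 1)]) acc) []

-- A's first loop: comb_and_next_start_collection (collection[i-1] is acc.getD (i-1) [])
def pvBuild (chars : List Char) : List (List (String × Nat)) :=
  (List.range chars.length).foldl
    (fun acc i =>
      acc ++ [if i = 0 then pvLevel0 chars else pvLevelStep chars (acc.getD (i - 1) [])]) []

def gen_binomial_theorem_collection (p_elements : String) (p_contain_zero : Bool) (p_zero_elem : String) (p_err_elem : String) : List (List String) :=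
  (List.range p_elements.toList.length).foldl
    (fun acc i =>
      acc ++ [(List.range ((pvBuild p_elements.toList).getD i []).length).foldl
        (fun item j => item ++ [(((pvBuild p_elements.toList).getD i []).getD j ("", 0)).1]) []])
    ((if p_contain_zero then [[p_zero_elem]] else []) ++ [[p_err_elem]])

-- ===== PORT B =====
-- itertools.combinations(xs, k), in itertools' order (index-increasing), over the characters
def pvCombs : Nat → List Char → List (List Char)
  | 0, _ => [[]]
  | _ + 1, [] => []
  | k + 1, c :: cs => (pvCombs k cs).map (fun t => c :: t) ++ pvCombs (k + 1) cs

def gen_binomial_theorem_collection_alt (p_elements : String) (p_contain_zero : Bool) (p_zero_elem : String) (p_err_elem : String) : List (List String) :=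
  ((if p_contain_zero then [[p_zero_elem]] else []) ++ [[p_err_elem]]) ++
    (List.range' 1 p_elements.toList.length).map
      (fun k => (pvCombs k p_elements.toList).map (fun c => String.ofList c))

-- ===== PRECONDITION & SPEC =====
def Spec_gen_binomial_theorem_collection (p_elements : String) (p_contain_zero : Bool) (p_zero_elem : String) (p_err_elem : String) (out : List (List String)) : Prop := out = gen_binomial_theorem_collection_alt p_elements p_contain_zero p_zero_elem p_err_elem
instance (p_elements : String) (p_contain_zero : Bool) (p_zero_elem : String) (p_err_elem : String) (out : List (List String)) : Decidable (Spec_gen_binomial_theorem_collection p_elements p_contain_zero p_zero_elem p_err_elem out) := by unfold Spec_gen_binomial_theorem_collection; infer_instance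

-- ===== CLAIM (what is proved, stated in full; the proofs are below) =====
def Claim_equal_gen_binomial_theorem_collection : Prop := ∀ (p_elements : String) (p_contain_zero : Bool) (p_zero_elem : String) (p_err_elem : String), Dom_gen_binomial_theorem_collection p_elements p_contain_zero p_zero_elem p_err_elem → Spec_gen_binomial_theorem_collection p_elements p_contain_zero p_zero_elem p_err_elem (gen_binomial_theorem_collection p_elements p_contain_zero p_zero_elem p_err_elem)

-- ===== LEMMAS AND PROOFS =====

-- size-k combinations together with the suffix remaining after the last chosen element
def pvC : Nat → List Char → List (List Char × List Char)
  | 0, cs => [([], cs)]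
  | _ + 1, [] => []
  | k + 1, c :: cs => (pvC k cs).map (fun y => (c :: y.1, y.2)) ++ pvC (k + 1) cs

-- one extension step: choose one further element from the remaining suffix
def pvExt (p : List Char) : List Char → List (List Char × List Char)
  | [] => []
  | c :: cs => (p ++ [c], cs) :: pvExt p cs

-- view a (combination, remaining suffix) pair as A's (string, next_trip_starting_idx) record
def pvToA (n : Nat) (x : List Char × List Char) : String × Nat :=
  (String.ofList x.1, n - x.2.length)

theorem pvSingleton_ofList (c : Char) : String.singleton c = String.ofList [c] :=
  String.toList_injective (by simp [String.toList_singleton c])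

theorem pvFoldlInner {α β γ : Type} (l : List α) (init : List γ) (r : α → List β) (f : α → β → γ) :
    l.foldl (fun acc x => (r x).foldl (fun a2 y => a2 ++ [f x y]) acc) init
      = init ++ l.flatMap (fun x => (r x).map (f x)) := by
  induction l generalizing init with
  | nil => simp
  | cons x xs ih =>
    rw [List.foldl_cons, PySem.List.foldl_append_singleton_eq_map, ih, List.flatMap_cons,
      List.append_assoc]

theorem pvExt_nil (cs : List Char) : pvExt [] cs = pvC 1 cs := by
  induction cs with
  | nil => rfl
  | cons c cs ih => simp [pvExt, pvC, ih]

theorem pvExt_cons (a : Char) (p cs : List Char) :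
    pvExt (a :: p) cs = (pvExt p cs).map (fun y => (a :: y.1, y.2)) := by
  induction cs with
  | nil => rfl
  | cons c cs ih => simp [pvExt, ih]

theorem pvC_flatMap (k : Nat) : ∀ cs : List Char,
    (pvC k cs).flatMap (fun x => pvExt x.1 x.2) = pvC (k + 1) cs := by
  induction k with
  | zero => intro cs; simp [pvC, pvExt_nil]
  | succ k ihk =>
    intro cs
    induction cs with
    | nil => rfl
    | cons c cs ihc =>
      simp only [pvC, List.flatMap_append, List.flatMap_map]
      rw [ihc]
      have : ((pvC k cs).flatMap fun y => pvExt (c :: y.1) y.2)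
          = ((pvC k cs).flatMap fun x => pvExt x.1 x.2).map (fun y => (c :: y.1, y.2)) := by
        rw [List.map_flatMap]
        exact List.flatMap_congr (fun y _ => pvExt_cons c y.1 y.2)
      rw [this, ihk cs]

theorem pvC_suffix (k : Nat) : ∀ (cs : List Char) (x : List Char × List Char),
    x ∈ pvC k cs → x.2 <:+ cs := by
  induction k with
  | zero =>
    intro cs x hx
    simp [pvC] at hx
    simp [hx]
  | succ k ihk =>
    intro cs
    induction cs with
    | nil => intro x hx; simp [pvC] at hx
    | cons c cs ihc =>
      intro x hx
      simp only [pvC, List.mem_append, List.mem_map] at hx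
      rcases hx with ⟨y, hy, rfl⟩ | hx
      · exact (ihk cs y hy).trans (List.suffix_cons c cs)
      · exact (ihc x hx).trans (List.suffix_cons c cs)

theorem pvCombs_eq_map_fst (k : Nat) : ∀ cs : List Char,
    (pvC k cs).map (fun x => x.1) = pvCombs k cs := by
  induction k with
  | zero => intro cs; simp [pvC, pvCombs]
  | succ k ihk =>
    intro cs
    induction cs with
    | nil => rfl
    | cons c cs ihc =>
      simp only [pvC, pvCombs, List.map_append, List.map_map]
      rw [ihc, ← ihk cs, List.map_map]
      rfl

-- A's inner index loop over range(start, len) computes pvExt over the remaining suffix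
theorem pvExtIdx (suf : List Char) : ∀ (front pre : List Char) (n : Nat),
    n = front.length + suf.length →
    (List.range' front.length suf.length).map
        (fun j => (String.ofList pre ++ String.singleton ((front ++ suf).getD j ' '), j + 1))
      = (pvExt pre suf).map (pvToA n) := by
  induction suf with
  | nil => intro front pre n _; rfl
  | cons c cs ih =>
    intro front pre n hn
    simp only [List.length_cons]
    rw [List.range'_succ, List.map_cons]
    have hhead : (front ++ c :: cs).getD front.length ' ' = c := by simp
    have htail := ih (front ++ [c]) pre n (by simp at hn ⊢; omega)
    simp only [List.length_append, List.length_cons, List.length_nil, List.append_assoc,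
      List.singleton_append] at htail
    rw [hhead, htail]
    simp only [pvExt, List.map_cons, pvToA]
    have h1 : String.ofList pre ++ String.singleton c = String.ofList (pre ++ [c]) := by
      rw [pvSingleton_ofList]; simp
    have h2 : front.length + 1 = n - cs.length := by simp at hn; omega
    rw [h1, h2]

theorem pvGetD_map_range {α : Type} (n : Nat) (g : Nat → α) (i : Nat) (h : i < n) (d : α) :
    ((List.range n).map g).getD i d = g i := by
  simp [List.getD, h]

theorem pvLevel0_eq (chars : List Char) :
    pvLevel0 chars = (pvC 1 chars).map (pvToA chars.length) := by
  unfold pvLevel0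
  rw [PySem.List.foldl_append_singleton_eq_map, List.nil_append, List.range_eq_range']
  have h := pvExtIdx chars [] [] chars.length (by simp)
  simp only [List.length_nil, List.nil_append] at h
  rw [← pvExt_nil, ← h]
  apply List.map_congr_left
  intro j _
  have : String.ofList ([] : List Char) ++ String.singleton (chars.getD j ' ')
      = String.singleton (chars.getD j ' ') := by simp [String.singleton]
  rw [this]

theorem pvLevelStep_eq (chars : List Char) (k : Nat) :
    pvLevelStep chars ((pvC k chars).map (pvToA chars.length))
      = (pvC (k + 1) chars).map (pvToA chars.length) := by
  unfold pvLevelStep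
  rw [pvFoldlInner _ _ (fun pc : String × Nat => List.range' pc.2 (chars.length - pc.2))
    (fun pc j => (pc.1 ++ String.singleton (chars.getD j ' '), j + 1)),
    List.nil_append, List.flatMap_map]
  have hcongr : ∀ x ∈ pvC k chars,
      (List.range' (pvToA chars.length x).2 (chars.length - (pvToA chars.length x).2)).map
          (fun j => ((pvToA chars.length x).1 ++ String.singleton (chars.getD j ' '), j + 1))
        = (pvExt x.1 x.2).map (pvToA chars.length) := by
    intro x hx
    obtain ⟨front, hfront⟩ := pvC_suffix k chars x hx
    have hlen : x.2.length ≤ chars.length := by rw [← hfront]; simp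
    have hfrontlen : front.length = chars.length - x.2.length := by rw [← hfront]; simp
    have hfl : chars.length - (chars.length - x.2.length) = x.2.length := by omega
    simp only [pvToA]
    rw [hfl, ← hfrontlen]
    have := pvExtIdx x.2 front x.1 chars.length (by rw [← hfront]; simp)
    rw [hfront] at this
    exact this
  calc ((pvC k chars).flatMap fun x =>
          (List.range' (pvToA chars.length x).2 (chars.length - (pvToA chars.length x).2)).map
            (fun j => ((pvToA chars.length x).1 ++ String.singleton (chars.getD j ' '), j + 1)))
      = (pvC k chars).flatMap (fun x => (pvExt x.1 x.2).map (pvToA chars.length)) :=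
        List.flatMap_congr hcongr
    _ = ((pvC k chars).flatMap (fun x => pvExt x.1 x.2)).map (pvToA chars.length) := by
        rw [List.map_flatMap]
    _ = (pvC (k + 1) chars).map (pvToA chars.length) := by rw [pvC_flatMap]

theorem pvBuild_aux (chars : List Char) (m : Nat) :
    (List.range m).foldl
        (fun acc i =>
          acc ++ [if i = 0 then pvLevel0 chars else pvLevelStep chars (acc.getD (i - 1) [])]) []
      = (List.range m).map (fun i => (pvC (i + 1) chars).map (pvToA chars.length)) := by
  induction m with
  | zero => rfl
  | succ m ih =>
    rw [List.range_succ, List.foldl_append, List.map_append, ih]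
    simp only [List.foldl_cons, List.foldl_nil, List.map_cons, List.map_nil]
    congr 1
    rcases Nat.eq_zero_or_pos m with rfl | hm
    · simp [pvLevel0_eq]
    · have hne : m ≠ 0 := Nat.pos_iff_ne_zero.mp hm
      rw [if_neg hne, pvGetD_map_range m _ (m - 1) (by omega)]
      have h1 : m - 1 + 1 = m := by omega
      rw [h1, pvLevelStep_eq]

theorem pvBuild_eq (chars : List Char) :
    pvBuild chars
      = (List.range chars.length).map (fun i => (pvC (i + 1) chars).map (pvToA chars.length)) := by
  unfold pvBuild
  exact pvBuild_aux chars chars.length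

theorem pvMapIdx {α β : Type} (l : List α) (d : α) (f : α → β) :
    (List.range l.length).map (fun j => f (l.getD j d)) = l.map f := by
  apply List.ext_getElem
  · simp
  · intro i h1 h2
    simp at h1 ⊢
    simp [List.getElem?_eq_getElem h1]

-- ===== VERDICT (by name: the statement is the Claim_ definition above) =====
theorem gen_binomial_theorem_collection_spec : Claim_equal_gen_binomial_theorem_collection := by
  intro p_elements p_contain_zero p_zero_elem p_err_elem _
  unfold Spec_gen_binomial_theorem_collection
  unfold gen_binomial_theorem_collection gen_binomial_theorem_collection_alt
  rw [PySem.List.foldl_append_singleton_eq_map]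
  congr 1
  rw [pvBuild_eq, List.range'_eq_map_range, List.map_map]
  apply List.map_congr_left
  intro i hi
  simp only [List.mem_range] at hi
  rw [pvGetD_map_range p_elements.toList.length _ i hi]
  rw [PySem.List.foldl_append_singleton_eq_map, List.nil_append]
  rw [pvMapIdx ((pvC (i + 1) p_elements.toList).map (pvToA p_elements.toList.length)) ("", 0)
    (fun x => x.1)]
  rw [List.map_map]
  have h2 : ((fun x : String × Nat => x.1) ∘ pvToA p_elements.toList.length)
      = (fun c => String.ofList c) ∘ (fun x : List Char × List Char => x.1) := by
    funext x; rfl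
  rw [h2, ← List.map_map, pvCombs_eq_map_fst]
  simp [Nat.add_comm]
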